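-- pv_equiv track=rewrite | github.com/jimmymaise/glue_core | opus_glue_core/core/common.py | merge_dict_lists
-- ===== SOURCE A (Python) =====
-- def merge_dict_lists(list1, list2, merge_key):
--     merged = {}
--     for item in list1 + list2:
--         if item[merge_key] in merged:
--             merged[item[merge_key]].update(item)
--         else:
--             merged[item[merge_key]] = item
--     return [val for (_, val) in merged.items()]
-- ===== SOURCE B (Python) =====
-- def merge_dict_lists(list1, list2, merge_key):
--     # Two staged passes, no in-place mutation: first collect the distinct merge
--     # keys in first-appearance order, then for each key rebuild its merged dict
--     # from scratch by scanning all items and folding matching ones into a fresh {}.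
--     items = list1 + list2
--     keys = list(dict.fromkeys(item[merge_key] for item in items))
--     out = []
--     for k in keys:
--         merged = {}
--         for item in items:
--             if item[merge_key] == k:
--                 merged.update(item)
--         out.append(merged)
--     return out
-- ===== Notes on version B (the rewrite author's own statement) =====
-- stated objective: alternative
-- what changed: Instead of A's single hash-merge loop that mutates the first dict seen per key, B first collects the distinct merge keys in first-appearance order (dict.fromkeys) and then, per key, rescans the whole item list and folds every matching item into a fresh empty dict; B returns newly built dicts and never mutates its arguments (A returns the mutated originals), but the returned value is identical.
import Mathlib
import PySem

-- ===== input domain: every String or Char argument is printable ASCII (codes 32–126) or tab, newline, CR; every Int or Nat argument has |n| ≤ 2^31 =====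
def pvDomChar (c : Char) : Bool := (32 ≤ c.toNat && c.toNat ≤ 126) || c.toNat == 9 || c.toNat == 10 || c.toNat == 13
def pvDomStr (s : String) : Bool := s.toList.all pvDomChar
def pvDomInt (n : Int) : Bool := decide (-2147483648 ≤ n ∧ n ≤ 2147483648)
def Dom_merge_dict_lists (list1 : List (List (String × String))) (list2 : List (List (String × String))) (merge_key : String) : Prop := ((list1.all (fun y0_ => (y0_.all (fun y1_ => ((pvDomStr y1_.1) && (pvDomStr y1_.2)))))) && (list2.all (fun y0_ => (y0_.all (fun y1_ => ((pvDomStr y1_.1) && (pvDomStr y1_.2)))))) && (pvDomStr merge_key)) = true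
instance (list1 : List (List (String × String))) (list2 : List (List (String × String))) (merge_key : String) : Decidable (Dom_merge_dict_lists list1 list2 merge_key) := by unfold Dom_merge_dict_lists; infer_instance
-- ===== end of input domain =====

-- B replaces A's single merge-as-you-go loop (which mutates the first dict seen per key) by two
-- staged passes: collect the distinct merge keys in first-appearance order, then rebuild each
-- key's merged dict from scratch by rescanning all items; A mutates its argument dicts in place
-- while B builds fresh dicts — the equivalence proved here is about the RETURNED value only.

-- shared one-liner: item[merge_key] as a dict lookup (none = KeyError, excluded by Pre_)
def keyOf (merge_key : String) (itemL : List (String × String)) : Option String :=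
  (PySem.Dict.ofList itemL).get? merge_key

-- ===== PORT A =====
-- A's loop step: if item[merge_key] in merged: merged[item[merge_key]].update(item)
-- else merged[item[merge_key]] = item.  d.update itemL is dict.update(item): inserting the
-- pairs in order is exact even when itemL repeats a key (insert overwrites keeping position).
def mergeStepA (merge_key : String) (merged : PySem.Dict String (PySem.Dict String String))
    (itemL : List (String × String)) : PySem.Dict String (PySem.Dict String String) :=
  match keyOf merge_key itemL with
  | none => merged
  | some key =>
    match merged.get? key with
    | some d => merged.insert key (d.update itemL)
    | none => merged.insert key (PySem.Dict.ofList itemL)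

def merge_dict_lists (list1 : List (List (String × String))) (list2 : List (List (String × String))) (merge_key : String) : List (List (String × String)) :=
  let merged := (list1 ++ list2).foldl (mergeStepA merge_key) PySem.Dict.empty
  merged.values.map (fun d => d.items)

-- ===== PORT B =====
-- B pass 2 inner step: if item[merge_key] == k: merged.update(item)
def mergeStepB (merge_key : String) (k : String) (m : PySem.Dict String String)
    (itemL : List (String × String)) : PySem.Dict String String :=
  match keyOf merge_key itemL with
  | none => m
  | some k' => if k' == k then m.update itemL else m

-- list(dict.fromkeys(item[merge_key] for item in items)) is PySem.List.dedup of the keys;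
-- filterMap's skipped 'none' is where the generator would raise KeyError (outside Pre_).
def merge_dict_lists_alt (list1 : List (List (String × String))) (list2 : List (List (String × String))) (merge_key : String) : List (List (String × String)) :=
  let items := list1 ++ list2
  let keys := PySem.List.dedup (items.filterMap (keyOf merge_key))
  keys.map (fun k => (items.foldl (mergeStepB merge_key k) PySem.Dict.empty).items)

-- ===== PRECONDITION & SPEC =====
-- Pre_ excludes exactly the inputs where Python A raises KeyError: some item lacks merge_key.
def Pre_merge_dict_lists (list1 : List (List (String × String))) (list2 : List (List (String × String))) (merge_key : String) : Prop :=
  ((list1 ++ list2).all (fun item => item.any (fun p => p.1 == merge_key))) = true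
instance (list1 : List (List (String × String))) (list2 : List (List (String × String))) (merge_key : String) : Decidable (Pre_merge_dict_lists list1 list2 merge_key) := by unfold Pre_merge_dict_lists; infer_instance
def pvWitness_merge_dict_lists : (List (List (String × String))) × (List (List (String × String))) × String :=
  ([[("k", "1"), ("a", "x")], [("k", "2"), ("b", "y")]], [[("k", "1"), ("c", "z")]], "k")

def Spec_merge_dict_lists (list1 : List (List (String × String))) (list2 : List (List (String × String))) (merge_key : String) (out : List (List (String × String))) : Prop := out = merge_dict_lists_alt list1 list2 merge_key
instance (list1 : List (List (String × String))) (list2 : List (List (String × String))) (merge_key : String) (out : List (List (String × String))) : Decidable (Spec_merge_dict_lists list1 list2 merge_key out) := by unfold Spec_merge_dict_lists; infer_instance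

-- ===== CLAIM (what is proved, stated in full; the proofs are below) =====
def Claim_equal_merge_dict_lists : Prop := ∀ (list1 : List (List (String × String))) (list2 : List (List (String × String))) (merge_key : String), Dom_merge_dict_lists list1 list2 merge_key → Pre_merge_dict_lists list1 list2 merge_key → Spec_merge_dict_lists list1 list2 merge_key (merge_dict_lists list1 list2 merge_key)

-- ===== LEMMAS AND PROOFS =====

-- abbreviations for B's two passes, used only by the proofs
def keysOf (merge_key : String) (ls : List (List (String × String))) : List String :=
  PySem.List.dedup (ls.filterMap (keyOf merge_key))

def mergeK (merge_key k : String) (ls : List (List (String × String))) : PySem.Dict String String :=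
  ls.foldl (mergeStepB merge_key k) PySem.Dict.empty

-- lookup in a dict whose items are a key list mapped through k ↦ (k, f k)
lemma get?_mk_map (f : String → PySem.Dict String String) (order : List String) (k : String) :
    (PySem.Dict.mk (order.map (fun k' => (k', f k')))).get? k
      = if k ∈ order then some (f k) else none := by
  induction order with
  | nil => simp [PySem.Dict.get?]
  | cons a rest ih =>
    rw [List.map_cons, PySem.Dict.get?_mk_cons, ih]
    by_cases h : a = k
    · simp [h]
    · simp [h, Ne.symm h]

-- a key never occurring in ls merges to the empty dict
lemma mergeK_empty (merge_key k : String) (ls : List (List (String × String)))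
    (h : ∀ it ∈ ls, keyOf merge_key it ≠ some k) : mergeK merge_key k ls = PySem.Dict.empty := by
  induction ls with
  | nil => rfl
  | cons it rest ih =>
    have hstep : mergeStepB merge_key k PySem.Dict.empty it = PySem.Dict.empty := by
      unfold mergeStepB
      cases hk : keyOf merge_key it with
      | none => rfl
      | some k' =>
        have : ¬ k' = k := fun he => h it (List.mem_cons_self) (he ▸ hk)
        simp [this]
    show (it :: rest).foldl (mergeStepB merge_key k) PySem.Dict.empty = _
    rw [List.foldl_cons, hstep]
    exact ih (fun x hx => h x (List.mem_cons_of_mem _ hx))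

-- the two key lists: appending one item
lemma keysOf_append (merge_key kx : String) (ls : List (List (String × String)))
    (x : List (String × String)) (hx : keyOf merge_key x = some kx) :
    keysOf merge_key (ls ++ [x])
      = if kx ∈ keysOf merge_key ls then keysOf merge_key ls else keysOf merge_key ls ++ [kx] := by
  unfold keysOf
  rw [List.filterMap_append]
  have h1 : List.filterMap (keyOf merge_key) [x] = [kx] := by simp [hx]
  rw [h1, PySem.List.dedup_eq_ofList, PySem.List.dedup_eq_ofList,
      PySem.Set.ofList_eq_foldl, PySem.Set.ofList_eq_foldl, List.foldl_append]
  simp [PySem.Set.add, PySem.Set.contains]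

-- the per-key merge: appending one item
lemma mergeK_append (merge_key k : String) (ls : List (List (String × String)))
    (x : List (String × String)) :
    mergeK merge_key k (ls ++ [x]) = mergeStepB merge_key k (mergeK merge_key k ls) x := by
  unfold mergeK; rw [List.foldl_append]; rfl

-- main invariant: A's merge-as-you-go dict IS B's key list zipped with B's per-key merges
lemma fold_eq (merge_key : String) (ls : List (List (String × String))) :
    ls.foldl (mergeStepA merge_key) PySem.Dict.empty
      = PySem.Dict.mk ((keysOf merge_key ls).map (fun k => (k, mergeK merge_key k ls))) := by
  induction ls using List.reverseRecOn with
  | nil => rfl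
  | append_singleton ls x ih =>
    rw [List.foldl_append, List.foldl_cons, List.foldl_nil, ih]
    unfold mergeStepA
    cases hx : keyOf merge_key x with
    | none =>
      have hkeys : keysOf merge_key (ls ++ [x]) = keysOf merge_key ls := by
        unfold keysOf; rw [List.filterMap_append]; simp [hx]
      have hm : ∀ k, mergeK merge_key k (ls ++ [x]) = mergeK merge_key k ls := by
        intro k; rw [mergeK_append]; unfold mergeStepB; rw [hx]
      simp only [hkeys]
      congr 1
      exact (List.map_congr_left (fun k _ => by rw [hm k])).symm
    | some kx =>
      dsimp only
      rw [get?_mk_map]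
      by_cases hmem : kx ∈ keysOf merge_key ls
      · -- key already present: A overwrites in place, the key list is unchanged
        simp only [hmem, if_true]
        have hc : (PySem.Dict.mk ((keysOf merge_key ls).map
            (fun k => (k, mergeK merge_key k ls)))).contains kx = true := by
          rw [PySem.Dict.contains_eq_isSome_get?, get?_mk_map]; simp [hmem]
        apply PySem.Dict.ext
        rw [PySem.Dict.items_insert_of_contains _ _ hc]
        show ((keysOf merge_key ls).map _).map _ = _
        rw [List.map_map, keysOf_append merge_key kx ls x hx]
        simp only [hmem, if_true]
        apply List.map_congr_left
        intro k _
        rw [mergeK_append]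
        unfold mergeStepB
        rw [hx]
        by_cases hk : k = kx
        · subst hk; simp [Function.comp]
        · have : (kx == k) = false := by simp [Ne.symm hk]
          simp [Function.comp, hk, this]
      · -- fresh key: A appends, B's key list gains kx whose merge is just this item
        simp only [hmem, if_false]
        have hc : (PySem.Dict.mk ((keysOf merge_key ls).map
            (fun k => (k, mergeK merge_key k ls)))).contains kx = false := by
          rw [PySem.Dict.contains_eq_isSome_get?, get?_mk_map]; simp [hmem]
        apply PySem.Dict.ext
        rw [PySem.Dict.items_insert_of_not_contains _ _ hc]
        show (keysOf merge_key ls).map _ ++ _ = _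
        rw [keysOf_append merge_key kx ls x hx]
        simp only [hmem, if_false, List.map_append, List.map_cons, List.map_nil]
        congr 1
        · apply List.map_congr_left
          intro k hk
          have hne : k ≠ kx := fun he => hmem (he ▸ hk)
          rw [mergeK_append]
          unfold mergeStepB
          rw [hx]
          have : (kx == k) = false := by simp [Ne.symm hne]
          simp [this]
        · have hnone : ∀ it ∈ ls, keyOf merge_key it ≠ some kx := by
            intro it hit he
            exact hmem ((PySem.List.mem_dedup _ _).mpr (List.mem_filterMap.mpr ⟨it, hit, he⟩))
          rw [mergeK_append, mergeK_empty merge_key kx ls hnone]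
          unfold mergeStepB
          rw [hx]
          simp only [BEq.rfl, if_true]
          rfl

theorem merge_equal (list1 list2 : List (List (String × String))) (merge_key : String) :
    merge_dict_lists list1 list2 merge_key = merge_dict_lists_alt list1 list2 merge_key := by
  unfold merge_dict_lists merge_dict_lists_alt
  rw [fold_eq]
  show (PySem.Dict.mk ((keysOf merge_key (list1 ++ list2)).map
      (fun k => (k, mergeK merge_key k (list1 ++ list2))))).values.map (fun d => d.items)
    = (keysOf merge_key (list1 ++ list2)).map
        (fun k => (mergeK merge_key k (list1 ++ list2)).items)
  simp [PySem.Dict.values, List.map_map, Function.comp]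

-- ===== VERDICT (by name: the statement is the Claim_ definition above) =====
theorem merge_dict_lists_spec : Claim_equal_merge_dict_lists := by
  intro list1 list2 merge_key _ _
  unfold Spec_merge_dict_lists
  exact merge_equal list1 list2 merge_key
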